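-- pv_equiv track=rewrite | github.com/ReproNim/reproman | niceman/interface/jobs.py | match
-- ===== SOURCE A (Python) =====
-- import operator
--
-- def match(query_id, jobids):
--     """Match `query_id` against `job_ids`.
--
--     Three types of matches are considered, in this order: full match or partial
--     match. If there is a full match, partial matches are not considered.
--
--     Parameters
--     ----------
--     query_id : str
--         A candidate for a match or partial match with a known job ID.
--     jobids : list of str
--         Known job IDs.
--
--     Returns
--     -------
--     Matched job ID (str) or None if there is no match.
--
--     Raises
--     ------
--     ValueError if there are multiple hits for `query_id`.
--     """
--     query_fns = [operator.eq, operator.contains]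
--     for fn in query_fns:
--         matches = [jobid for jobid in jobids if fn(jobid, query_id)]
--         if len(matches) == 1:
--             return matches[0]
--         elif matches:
--             # TODO: Use custom exception.
--             raise ValueError("ID {} matches multiple jobs: {}"
--                              .format(query_id, ", ".join(matches)))
-- ===== SOURCE B (Python) =====
-- def match(query_id, jobids):
--     """Single pass: classify each jobid as exact or partial, then pick."""
--     exact = []
--     partial = []
--     for jobid in jobids:
--         if jobid == query_id:
--             exact.append(jobid)
--         elif query_id in jobid:
--             partial.append(jobid)
--     for matches in (exact, partial):
--         if len(matches) == 1:
--             return matches[0]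
--         if matches:
--             raise ValueError("ID {} matches multiple jobs: {}"
--                              .format(query_id, ", ".join(matches)))
--     return None
-- ===== Notes on version B (the rewrite author's own statement) =====
-- stated objective: alternative
-- what changed: Replaces the loop over comparison functions with re-filtering of the whole list per function by a single pass that classifies each jobid into exact/partial lists, then applies the pick/raise logic to each list.
import Mathlib
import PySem

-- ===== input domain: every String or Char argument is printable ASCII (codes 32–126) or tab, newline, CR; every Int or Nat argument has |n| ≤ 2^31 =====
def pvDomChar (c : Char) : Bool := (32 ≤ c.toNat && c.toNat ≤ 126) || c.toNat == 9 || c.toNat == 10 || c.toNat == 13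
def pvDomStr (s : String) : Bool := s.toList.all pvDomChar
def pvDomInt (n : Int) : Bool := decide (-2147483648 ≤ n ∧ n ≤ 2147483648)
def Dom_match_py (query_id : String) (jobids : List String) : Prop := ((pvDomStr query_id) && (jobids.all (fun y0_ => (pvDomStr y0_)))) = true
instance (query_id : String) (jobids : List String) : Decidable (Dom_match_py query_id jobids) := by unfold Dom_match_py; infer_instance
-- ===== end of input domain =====

-- B is an alternative decomposition of the same task: one classifying pass instead of
-- one filtering pass per comparison function; same cost, same results.

-- ===== PORT A =====
-- A iterates over [operator.eq, operator.contains], filtering the whole list with each.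
-- The two filter predicates, in A's order (eq(jobid, query_id); contains(jobid, query_id)):
def matchAFns (query_id : String) : List (String → Bool) :=
  [fun jobid => jobid == query_id, fun jobid => PySem.Str.isIn query_id jobid]

def matchALoop (query_id : String) (jobids : List String) : List (String → Bool) → Option String
  | [] => none                                   -- falls off the loop: returns None
  | fn :: rest =>
      let ms := jobids.filter fn
      if ms.length = 1 then ms.head?   -- return ms[0]
      else if ms ≠ [] then none             -- raise ValueError (excluded by Pre_)
      else matchALoop query_id jobids rest

def match_py (query_id : String) (jobids : List String) : Option String :=
  matchALoop query_id jobids (matchAFns query_id)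

-- ===== PORT B =====
-- one pass building (exact, partial), then the pick/raise logic applied to each list
def matchBPick : List String → Option String → Option String
  | ms, cont =>
      if ms.length = 1 then ms.head?
      else if ms ≠ [] then none             -- raise ValueError (excluded by Pre_)
      else cont

def match_py_alt (query_id : String) (jobids : List String) : Option String :=
  let acc := jobids.foldl (fun (p : List String × List String) jobid =>
      if jobid == query_id then (p.1 ++ [jobid], p.2)
      else if PySem.Str.isIn query_id jobid then (p.1, p.2 ++ [jobid])
      else p) ([], [])
  matchBPick acc.1 (matchBPick acc.2 none)

-- ===== PRECONDITION & SPEC =====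
-- Pre_ excludes exactly the inputs on which A raises ValueError: two or more exact
-- ms, or (no exact match and) two or more substring ms.
def Pre_match_py (query_id : String) (jobids : List String) : Prop :=
  (jobids.filter (fun j => j == query_id)).length ≤ 1 ∧
  ((jobids.filter (fun j => j == query_id)) = [] →
    (jobids.filter (fun j => PySem.Str.isIn query_id j)).length ≤ 1)
instance (query_id : String) (jobids : List String) : Decidable (Pre_match_py query_id jobids) := by unfold Pre_match_py; infer_instance

def pvWitness_match_py : String × List String := ("ab", ["abc", "x", "ab"])

def Spec_match_py (query_id : String) (jobids : List String) (out : Option String) : Prop := out = match_py_alt query_id jobids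
instance (query_id : String) (jobids : List String) (out : Option String) : Decidable (Spec_match_py query_id jobids out) := by unfold Spec_match_py; infer_instance

-- ===== CLAIM (what is proved, stated in full; the proofs are below) =====
def Claim_equal_match_py : Prop := ∀ (query_id : String) (jobids : List String), Dom_match_py query_id jobids → Pre_match_py query_id jobids → Spec_match_py query_id jobids (match_py query_id jobids)

-- ===== LEMMAS AND PROOFS =====

-- B's fold accumulates exactly the two filters (partial excludes exact ms)
theorem matchB_fold_eq (query_id : String) (jobids : List String) (e p : List String) :
    jobids.foldl (fun (p : List String × List String) jobid =>
      if jobid == query_id then (p.1 ++ [jobid], p.2)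
      else if PySem.Str.isIn query_id jobid then (p.1, p.2 ++ [jobid])
      else p) (e, p)
    = (e ++ jobids.filter (fun j => j == query_id),
       p ++ jobids.filter (fun j => !(j == query_id) && PySem.Str.isIn query_id j)) := by
  induction jobids generalizing e p with
  | nil => simp
  | cons x xs ih =>
      simp only [List.foldl_cons]
      by_cases hx : (x == query_id) = true
      · rw [if_pos hx, ih]; simp [hx]
      · rw [if_neg hx]
        by_cases hin : PySem.Str.isIn query_id x = true
        · rw [if_pos hin, ih]
          unfold PySem.Str.isIn at hin
          simp [hx, hin]
        · rw [if_neg hin, ih]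
          unfold PySem.Str.isIn at hin
          simp only [Bool.not_eq_true] at hin
          simp [hx, hin]

theorem match_py_spec : Claim_equal_match_py := by
  intro query_id jobids _ hpre
  obtain ⟨h1, h2⟩ := hpre
  unfold Spec_match_py match_py match_py_alt matchALoop matchAFns matchBPick
  simp only [matchB_fold_eq, List.nil_append]
  by_cases hE1 : (jobids.filter (fun j => j == query_id)).length = 1
  · rw [if_pos hE1, if_pos hE1]
  · have hEnil : jobids.filter (fun j => j == query_id) = [] := by
      cases h : jobids.filter (fun j => j == query_id) with
      | nil => rfl
      | cons a t =>
          rw [h] at h1 hE1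
          simp only [List.length_cons] at h1 hE1
          omega
    have hcongr : jobids.filter (fun j => !(j == query_id) && PySem.Str.isIn query_id j)
        = jobids.filter (fun j => PySem.Str.isIn query_id j) := by
      apply List.filter_congr
      intro x hx
      have hne : ¬ (x == query_id) = true := by
        intro h
        have : x ∈ jobids.filter (fun j => j == query_id) := List.mem_filter.2 ⟨hx, h⟩
        simp [hEnil] at this
      simp [hne]
    rw [if_neg hE1, if_neg hE1, hEnil]
    simp only [ne_eq, not_true_eq_false, if_false, hcongr, matchALoop]

-- ===== VERDICT (by name: the statement is the Claim_ definition above) =====
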